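-- pv_equiv track=rewrite | github.com/theOGognf/finagg | src/finagg/frame.py | is_valid_fiscal_seq
-- ===== SOURCE A (Python) =====
-- def is_valid_fiscal_seq(seq: list[int], /) -> bool:
--     """Determine if the sequence of fiscal quarter differences is continuous.
--
--     A sequence that contains a jump from Q3 to Q1 is considered valid because
--     companies often aren't required (and don't) report fundamentals/metrics
--     for Q4.
--
--     Args:
--         seq: Sequence of fiscal quarter differences.
--
--     Returns:
--         Whether the sequence is a valid, ordered fiscal quarter sequence.
--
--     Examples:
--         This fiscal quarter difference sequence is synonymous with
--         the quarter sequence [Q2, Q3, Q1, Q2, Q3].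
--
--         >>> from finagg.frame import is_valid_fiscal_seq
--         >>> is_valid_fiscal_seq([1, 2, 1, 1])
--         True
--
--         This fiscal quarter difference sequence is synonymous with
--         the quarter sequence [Q2, Q3, Q4, Q1, Q2].
--
--         >>> is_valid_fiscal_seq([1, 1, 1, 1])
--         True
--
--         This fiscal quarter difference sequence is synonymous with
--         the quarter sequence [Q1, Q4] which is not a valid fiscal
--         sequence.
--
--         >>> is_valid_fiscal_seq([3])
--         False
--
--     """
--     valid = {(1, 1, 1), (1, 1, 2), (1, 2, 1), (2, 1, 1), (1, 1), (2, 1), (1, 2)}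
--     if len(seq) > 1:
--         for i in range(len(seq) - 1):
--             subseq = tuple(seq[i : i + 3])
--             if subseq not in valid:
--                 return False
--     else:
--         if seq[0] not in {1, 2}:
--             return False
--     return True
-- ===== SOURCE B (Python) =====
-- def is_valid_fiscal_seq(seq: list[int], /) -> bool:
--     """Single stateful scan: every element must be 1 or 2, and any two 2s
--     (i.e. Q3->Q1 skips) must be at least three positions apart."""
--     if len(seq) <= 1:
--         return seq[0] in (1, 2)
--     last2 = -10
--     for i, x in enumerate(seq):
--         if x not in (1, 2):
--             return False
--         if x == 2:
--             if i - last2 <= 2: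
--                 return False
--             last2 = i
--     return True
-- ===== Notes on version B (the rewrite author's own statement) =====
-- stated objective: simpler
-- what changed: Replaces the sliding-window tuple construction and membership test in a 7-element set with a single stateful scan that checks every element is 1 or 2 and that consecutive 2s are at least three positions apart.
import Mathlib
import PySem

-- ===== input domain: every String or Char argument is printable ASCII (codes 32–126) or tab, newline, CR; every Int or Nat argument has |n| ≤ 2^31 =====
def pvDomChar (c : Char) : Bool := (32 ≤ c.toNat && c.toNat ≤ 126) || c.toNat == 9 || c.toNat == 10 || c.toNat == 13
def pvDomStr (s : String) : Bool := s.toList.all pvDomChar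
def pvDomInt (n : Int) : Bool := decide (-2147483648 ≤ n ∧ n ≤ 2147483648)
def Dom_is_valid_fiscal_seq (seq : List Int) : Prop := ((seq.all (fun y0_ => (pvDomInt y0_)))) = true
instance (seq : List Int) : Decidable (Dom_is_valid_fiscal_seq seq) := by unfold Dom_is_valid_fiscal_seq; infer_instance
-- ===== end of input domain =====

-- B replaces A's sliding-window tuple/set membership with a single stateful scan
-- (every element in {1,2}, consecutive 2s at least three apart); return values agree
-- on all non-empty inputs (both raise IndexError on []).

-- ===== PORT A =====
-- the `valid` set of window tuples (tuples of length 2/3 become lists)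
def pvValidWindows : List (List Int) := [[1,1,1],[1,1,2],[1,2,1],[2,1,1],[1,1],[2,1],[1,2]]

-- the `for i in range(len(seq)-1)` loop with early return False
def pvALoop (seq : List Int) : List Int → Bool
  | [] => true
  | i :: rest =>
    let subseq := PySem.List.slice seq (some i) (some (i + 3))
    if subseq ∈ pvValidWindows then pvALoop seq rest else false

def is_valid_fiscal_seq (seq : List Int) : Bool :=
  if (seq.length : Int) > 1 then
    pvALoop seq (PySem.List.pyRange 0 ((seq.length : Int) - 1) 1)
  else
    match PySem.List.pyGet? seq 0 with  -- seq[0]: IndexError on [] (excluded by Pre_)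
    | some v => if ¬(v = 1 ∨ v = 2) then false else true
    | none => false

-- ===== PORT B =====
-- the `for i, x in enumerate(seq)` loop carrying last2
def pvBLoop : List (Int × Int) → Int → Bool
  | [], _ => true
  | (i, x) :: rest, last2 =>
    if ¬(x = 1 ∨ x = 2) then false
    else if x = 2 then
      (if i - last2 ≤ 2 then false else pvBLoop rest i)
    else pvBLoop rest last2

def is_valid_fiscal_seq_alt (seq : List Int) : Bool :=
  if seq.length ≤ 1 then
    match PySem.List.pyGet? seq 0 with  -- seq[0]: IndexError on [] (excluded by Pre_)
    | some v => decide (v = 1 ∨ v = 2)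
    | none => false
  else pvBLoop (PySem.List.enumerate seq) (-10)

-- ===== PRECONDITION & SPEC =====
-- Pre_ excludes only the empty list, on which both A and B raise IndexError (seq[0]).
def Pre_is_valid_fiscal_seq (seq : List Int) : Prop := seq ≠ []
instance (seq : List Int) : Decidable (Pre_is_valid_fiscal_seq seq) := by unfold Pre_is_valid_fiscal_seq; infer_instance
def pvWitness_is_valid_fiscal_seq : List Int := [1, 2, 1, 1]

def Spec_is_valid_fiscal_seq (seq : List Int) (out : Bool) : Prop := out = is_valid_fiscal_seq_alt seq
instance (seq : List Int) (out : Bool) : Decidable (Spec_is_valid_fiscal_seq seq out) := by unfold Spec_is_valid_fiscal_seq; infer_instance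

-- ===== CLAIM (what is proved, stated in full; the proofs are below) =====
def Claim_equal_is_valid_fiscal_seq : Prop := ∀ (seq : List Int), Dom_is_valid_fiscal_seq seq → Pre_is_valid_fiscal_seq seq → Spec_is_valid_fiscal_seq seq (is_valid_fiscal_seq seq)

-- ===== LEMMAS AND PROOFS =====

-- common reference form: k leading positions may not hold a 2
def altOk : Nat → List Int → Bool
  | _, [] => true
  | k, x :: rest =>
    if x = 1 then altOk (k - 1) rest
    else if x = 2 then (if k = 0 then altOk 2 rest else false)
    else false

-- B's scan equals altOk with k = max 0 (last2 + 3 - n)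
theorem pvBLoop_eq_altOk (seq : List Int) : ∀ (n last2 : Int),
    pvBLoop (PySem.List.enumerate seq n) last2 = altOk (last2 + 3 - n).toNat seq := by
  induction seq with
  | nil => intro n last2; simp [PySem.List.enumerate_nil, pvBLoop, altOk]
  | cons x rest ih =>
    intro n last2
    rw [PySem.List.enumerate_cons]
    by_cases h1 : x = 1
    · have hk : (last2 + 3 - (n + 1)).toNat = (last2 + 3 - n).toNat - 1 := by omega
      simp [pvBLoop, altOk, h1, ih, hk]
    · by_cases h2 : x = 2
      · by_cases h3 : n - last2 ≤ 2
        · have hk : (last2 + 3 - n).toNat ≠ 0 := by omega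
          simp [pvBLoop, altOk, h2, h3, hk]
        · have hk : (last2 + 3 - n).toNat = 0 := by omega
          have hk2 : (n + 3 - (n + 1)).toNat = 2 := by omega
          simp [pvBLoop, altOk, h2, h3, hk, ih]
      · simp [pvBLoop, altOk, h1, h2]

-- A's window check, structurally on the suffix
def wOk : List Int → Bool
  | a :: b :: rest => (decide ((a :: b :: rest).take 3 ∈ pvValidWindows)) && wOk (b :: rest)
  | _ => true

-- A's range loop from index k equals wOk on the suffix
theorem pvALoop_eq_wOk (seq : List Int) : ∀ (m k : Nat), seq.length - k = m →
    pvALoop seq (PySem.List.pyRange (k : Int) ((seq.length : Int) - 1) 1) = wOk (seq.drop k) := by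
  intro m
  induction m with
  | zero =>
    intro k hk
    have h1 : (seq.length : Int) - 1 ≤ (k : Int) := by omega
    rw [PySem.List.pyRange_one_eq_nil h1]
    have h2 : seq.drop k = [] := List.drop_eq_nil_of_le (by omega)
    simp [pvALoop, h2, wOk]
  | succ m ih =>
    intro k hk
    by_cases hlast : seq.length = k + 1
    · have h1 : (seq.length : Int) - 1 ≤ (k : Int) := by omega
      rw [PySem.List.pyRange_one_eq_nil h1]
      have h2 : (seq.drop k).length = 1 := by simp [List.length_drop]; omega
      match hd : seq.drop k with
      | [] => simp [pvALoop, wOk]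
      | [x] => simp [pvALoop, wOk]
      | x :: y :: t => rw [hd] at h2; simp at h2
    · have hlt : (k : Int) < (seq.length : Int) - 1 := by omega
      rw [PySem.List.pyRange_one_cons hlt]
      have hsl : PySem.List.slice seq (some (k : Int)) (some ((k : Int) + 3))
          = (seq.drop k).take 3 := by
        have hc : ((k : Int) + 3) = ((k + 3 : Nat) : Int) := by push_cast; ring
        have ha : (0 : Int) ≤ (k : Int) := by omega
        have hb : (0 : Int) ≤ ((k + 3 : Nat) : Int) := by omega
        rw [hc, PySem.List.slice_toNat seq ha hb]
        simp only [Int.toNat_natCast]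
        congr 1
        omega
      have hlen : 2 ≤ (seq.drop k).length := by simp [List.length_drop]; omega
      match hd : seq.drop k with
      | [] => rw [hd] at hlen; simp at hlen
      | [x] => rw [hd] at hlen; simp at hlen
      | a :: b :: t =>
        have hdrop1 : seq.drop (k + 1) = b :: t := by
          rw [← List.drop_drop (i := 1) (j := k) (l := seq), hd]
          rfl
        have hcast : ((k : Int) + 1) = ((k + 1 : Nat) : Int) := by push_cast; ring
        have hrec := ih (k + 1) (by omega)
        rw [hdrop1] at hrec
        show (if PySem.List.slice seq (some (k:Int)) (some ((k:Int)+3)) ∈ pvValidWindows then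
                pvALoop seq (PySem.List.pyRange ((k:Int)+1) ((seq.length : Int) - 1) 1) else false)
            = wOk (a :: b :: t)
        rw [hsl, hd, hcast, hrec]
        by_cases hm : (a :: b :: t).take 3 ∈ pvValidWindows <;> simp [wOk]

-- the window check equals the stateful-scan check on lists of length ≥ 2
theorem wOk_eq_altOk : ∀ (l : List Int), 2 ≤ l.length → wOk l = altOk 0 l := by
  intro l
  induction l with
  | nil => intro h; simp at h
  | cons a t ih =>
    intro h
    match t with
    | [] => simp at h
    | [b] =>
      have hw : wOk [a, b] = (decide (List.take 3 [a, b] ∈ pvValidWindows) && true) := rfl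
      have hm : (List.take 3 [a, b] ∈ pvValidWindows) ↔
          ((a = 1 ∧ b = 1) ∨ (a = 2 ∧ b = 1) ∨ (a = 1 ∧ b = 2)) := by
        simp [pvValidWindows]
      rw [hw, decide_eq_decide.mpr hm]
      by_cases h1 : a = 1 <;> by_cases h2 : a = 2 <;> by_cases h3 : b = 1 <;> by_cases h4 : b = 2 <;>
        simp [altOk, h1, h2, h3, h4]
      infer_instance
    | b :: c :: v =>
      have ihv := ih (by simp)
      have hw : wOk (a :: b :: c :: v)
          = ((decide (List.take 3 (a :: b :: c :: v) ∈ pvValidWindows)) && wOk (b :: c :: v)) := rfl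
      have hm : (List.take 3 (a :: b :: c :: v) ∈ pvValidWindows) ↔
          ((a = 1 ∧ b = 1 ∧ c = 1) ∨ (a = 1 ∧ b = 1 ∧ c = 2) ∨
           (a = 1 ∧ b = 2 ∧ c = 1) ∨ (a = 2 ∧ b = 1 ∧ c = 1)) := by
        simp [pvValidWindows]
      rw [hw, decide_eq_decide.mpr hm, ihv]
      by_cases h1 : a = 1 <;> by_cases h2 : a = 2 <;>
        by_cases h3 : b = 1 <;> by_cases h4 : b = 2 <;>
        by_cases h5 : c = 1 <;> by_cases h6 : c = 2 <;>
        simp [altOk, h1, h2, h3, h4, h5, h6]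
      infer_instance

-- ===== VERDICT (by name: the statement is the Claim_ definition above) =====
theorem is_valid_fiscal_seq_spec : Claim_equal_is_valid_fiscal_seq := by
  intro seq _ hpre
  unfold Spec_is_valid_fiscal_seq is_valid_fiscal_seq is_valid_fiscal_seq_alt
  by_cases hlen : seq.length ≤ 1
  · have h1 : ¬ ((seq.length : Int) > 1) := by omega
    simp only [h1, if_pos hlen, reduceIte]
    cases hg : PySem.List.pyGet? seq 0 with
    | none => rfl
    | some v => by_cases hv : v = 1 ∨ v = 2 <;> simp [hv]
  · have h2 : (seq.length : Int) > 1 := by omega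
    simp only [h2, if_pos, if_neg hlen]
    have hA := pvALoop_eq_wOk seq seq.length 0 (by omega)
    simp only [Nat.cast_zero, List.drop_zero] at hA
    have hB := pvBLoop_eq_altOk seq 0 (-10)
    have hk : ((-10 : Int) + 3 - 0).toNat = 0 := by omega
    rw [hk] at hB
    rw [hA, hB, wOk_eq_altOk seq (by omega)]
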